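-- pv_equiv track=rewrite | github.com/BYU-Capstone-42-2024-2025/PythonStandardChecker | StandardCheck.py | _parseArgLines
-- ===== SOURCE A (Python) =====
-- def _parseArgLines(section: str) -> list[str]:
--     """Parse out the argument descriptions from the docstring.
--
--     Args:
--         section (str): the section to parse args from
--
--     Returns:
--         list[str]: the parsed arg lines
--     """
--     splitArgsSection = section.split("\n")
--     if len(splitArgsSection) < 2:
--         return
--
--     argLines = []
--     index = 1
--     while index < len(splitArgsSection):
--         currentLine = splitArgsSection[index]
--         if "):" not in currentLine:
--             return
--
--         additionalLineJump = 0
--         if (index + 1) < len(splitArgsSection):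
--             tempIndex = index + 1
--             while tempIndex < len(splitArgsSection) and "):" not in splitArgsSection[tempIndex]:
--                 currentLine += splitArgsSection[tempIndex]
--                 tempIndex += 1
--             additionalLineJump = tempIndex - index
--         else:
--             additionalLineJump = 1
--
--         argLines.append(currentLine)
--         index += additionalLineJump
--     return argLines
-- ===== SOURCE B (Python) =====
-- def _parseArgLines(section: str) -> list[str]:
--     lines = section.split("\n")
--     if len(lines) < 2 or "):" not in lines[1]:
--         return None
--     result = []
--     for line in lines[1:]:
--         if "):" in line:
--             result.append(line)
--         else:
--             result[-1] += line
--     return result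
-- ===== Notes on version B (the rewrite author's own statement) =====
-- stated objective: simpler
-- what changed: Replaces the nested while-loops with manual index-jump arithmetic by a single flat pass over the lines after the first that starts a new record at each argument-header line and concatenates continuation lines onto the last record.
import Mathlib
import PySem

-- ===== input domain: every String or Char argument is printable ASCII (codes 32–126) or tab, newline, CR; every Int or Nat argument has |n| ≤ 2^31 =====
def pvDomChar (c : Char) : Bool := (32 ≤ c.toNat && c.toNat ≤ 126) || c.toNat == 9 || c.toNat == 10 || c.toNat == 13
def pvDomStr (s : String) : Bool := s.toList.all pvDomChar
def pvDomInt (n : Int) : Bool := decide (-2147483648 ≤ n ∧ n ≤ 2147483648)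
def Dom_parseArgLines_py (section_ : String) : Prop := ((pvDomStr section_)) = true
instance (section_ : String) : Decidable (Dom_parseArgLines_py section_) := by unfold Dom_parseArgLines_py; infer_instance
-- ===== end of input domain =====

-- B replaces A's nested while-loops and manual index-jump arithmetic by one flat pass that
-- groups continuation lines onto the last record (objective: simpler).

-- ===== PORT A =====
-- inner while loop: consumes lines without "):", concatenating them onto `cur`;
-- returns (tempIndex, currentLine) as at loop exit
def pvAInner (xs : List String) (tempIndex : Nat) (cur : String) : Nat × String :=
  if tempIndex < xs.length ∧ PySem.Str.isIn "):" (xs.getD tempIndex "") = false then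
    pvAInner xs (tempIndex + 1) (cur ++ xs.getD tempIndex "")
  else
    (tempIndex, cur)
termination_by xs.length - tempIndex

-- the inner while loop never moves the index backwards (termination fact for the outer loop)
theorem pvAInner_ge_aux (xs : List String) :
    ∀ (n t : Nat) (cur : String), xs.length - t ≤ n → t ≤ (pvAInner xs t cur).1 := by
  intro n
  induction n with
  | zero =>
    intro t cur hn
    rw [pvAInner]
    split
    · rename_i h; omega
    · exact le_refl t
  | succ n ih =>
    intro t cur hn
    rw [pvAInner]
    split
    · rename_i h
      exact le_trans (Nat.le_succ t) (ih (t + 1) _ (by omega))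
    · exact le_refl t

theorem pvAInner_ge (xs : List String) (t : Nat) (cur : String) : t ≤ (pvAInner xs t cur).1 :=
  pvAInner_ge_aux xs (xs.length - t) t cur (le_refl _)

-- outer while loop of A
def pvALoop (xs : List String) (index : Nat) (argLines : List String) : Option (List String) :=
  if _hidx : index < xs.length then
    let currentLine := xs.getD index ""
    if PySem.Str.isIn "):" currentLine = false then
      none
    else
      if index + 1 < xs.length then
        let r := pvAInner xs (index + 1) currentLine
        pvALoop xs r.1 (argLines ++ [r.2])
      else
        pvALoop xs (index + 1) (argLines ++ [currentLine])
  else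
    some argLines
termination_by xs.length - index
decreasing_by
  · have := pvAInner_ge xs (index + 1) (xs.getD index "")
    omega
  · omega

def parseArgLines_py (section_ : String) : Option (List String) :=
  let splitArgsSection := (PySem.Str.split? section_ "\n").getD []
  if splitArgsSection.length < 2 then
    none
  else
    pvALoop splitArgsSection 1 []

-- ===== PORT B =====
-- body of B's for-loop: start a new record on a "):"-line, else extend the last record
def pvBStep (acc : List String) (line : String) : List String :=
  if PySem.Str.isIn "):" line then
    acc ++ [line]
  else
    match acc.getLast? with
    | some last => acc.dropLast ++ [last ++ line]
    | none => acc   -- unreachable: the lines[1] guard makes acc nonempty in the loop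

def parseArgLines_py_alt (section_ : String) : Option (List String) :=
  let lines := (PySem.Str.split? section_ "\n").getD []
  if lines.length < 2 ∨ PySem.Str.isIn "):" (lines.getD 1 "") = false then
    none
  else
    some ((lines.drop 1).foldl pvBStep [])

-- ===== PRECONDITION & SPEC =====
def Spec_parseArgLines_py (section_ : String) (out : Option (List String)) : Prop := out = parseArgLines_py_alt section_
instance (section_ : String) (out : Option (List String)) : Decidable (Spec_parseArgLines_py section_ out) := by unfold Spec_parseArgLines_py; infer_instance

-- ===== CLAIM (what is proved, stated in full; the proofs are below) =====
def Claim_equal_parseArgLines_py : Prop := ∀ (section_ : String), Dom_parseArgLines_py section_ → Spec_parseArgLines_py section_ (parseArgLines_py section_)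

-- ===== LEMMAS AND PROOFS =====

-- absorbing A's inner while loop into B's fold: B's fold over the suffix from t with last
-- record `cur` open equals the fold from where the inner loop stops, with record extended
theorem pvAInner_fold (xs : List String) (t : Nat) (cur : String) (acc : List String) :
    List.foldl pvBStep (acc ++ [cur]) (xs.drop t) =
      List.foldl pvBStep (acc ++ [(pvAInner xs t cur).2]) (xs.drop (pvAInner xs t cur).1) := by
  have main : ∀ (n t : Nat) (cur : String) (acc : List String), xs.length - t ≤ n →
      List.foldl pvBStep (acc ++ [cur]) (xs.drop t) =
        List.foldl pvBStep (acc ++ [(pvAInner xs t cur).2]) (xs.drop (pvAInner xs t cur).1) := by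
    intro n
    induction n with
    | zero =>
      intro t cur acc hn
      rw [pvAInner]
      split
      · rename_i h; omega
      · rfl
    | succ n ih =>
      intro t cur acc hn
      rw [pvAInner]
      split
      · rename_i h
        have hdrop : xs.drop t = xs.getD t "" :: xs.drop (t + 1) := by
          rw [List.getD_eq_getElem xs _ h.1, List.drop_eq_getElem_cons h.1]
        rw [hdrop]
        have hstep : pvBStep (acc ++ [cur]) (xs.getD t "") = acc ++ [cur ++ xs.getD t ""] := by
          unfold pvBStep
          rw [if_neg (by simpa using h.2), List.getLast?_concat]
          simp
        rw [List.foldl_cons, hstep]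
        exact ih (t + 1) _ _ (by omega)
      · rfl
  exact main (xs.length - t) t cur acc (le_refl _)

-- the inner loop stops at the end or on a "):"-line
theorem pvAInner_stop (xs : List String) (t : Nat) (cur : String)
    (h : (pvAInner xs t cur).1 < xs.length) :
    PySem.Str.isIn "):" (xs.getD (pvAInner xs t cur).1 "") = true := by
  have main : ∀ (n t : Nat) (cur : String), xs.length - t ≤ n →
      (pvAInner xs t cur).1 < xs.length →
      PySem.Str.isIn "):" (xs.getD (pvAInner xs t cur).1 "") = true := by
    intro n
    induction n with
    | zero =>
      intro t cur hn h
      rw [pvAInner] at h ⊢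
      split at h
      · rename_i hc; omega
      · rename_i hc
        rw [if_neg hc]
        simp only [not_and_or, Bool.not_eq_false] at hc
        rcases hc with hc | hc
        · exact absurd h hc
        · exact hc
    | succ n ih =>
      intro t cur hn h
      rw [pvAInner] at h ⊢
      split at h
      · rename_i hc
        rw [if_pos hc]
        exact ih (t + 1) _ (by omega) h
      · rename_i hc
        rw [if_neg hc]
        simp only [not_and_or, Bool.not_eq_false] at hc
        rcases hc with hc | hc
        · exact absurd h hc
        · exact hc
  exact main (xs.length - t) t cur (le_refl _) h

-- main loop invariant: when the current line contains "):" (as it does at every iteration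
-- A's outer loop actually reaches), A's outer loop computes B's fold over the suffix
theorem pvALoop_eq_fold (xs : List String) (index : Nat) (acc : List String)
    (hlt : index < xs.length) (hp : PySem.Str.isIn "):" (xs.getD index "") = true) :
    pvALoop xs index acc = some (List.foldl pvBStep acc (xs.drop index)) := by
  have main : ∀ (n index : Nat) (acc : List String), xs.length - index ≤ n →
      index < xs.length → PySem.Str.isIn "):" (xs.getD index "") = true →
      pvALoop xs index acc = some (List.foldl pvBStep acc (xs.drop index)) := by
    intro n
    induction n with
    | zero => intro index acc hn hlt hp; omega
    | succ n ih =>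
      intro index acc hn hlt hp
      have hdrop : xs.drop index = xs.getD index "" :: xs.drop (index + 1) := by
        rw [List.getD_eq_getElem xs _ hlt, List.drop_eq_getElem_cons hlt]
      have hstep : pvBStep acc (xs.getD index "") = acc ++ [xs.getD index ""] := by
        unfold pvBStep
        rw [if_pos (by simpa using hp)]
      rw [pvALoop, dif_pos hlt, if_neg (by simpa using hp), hdrop, List.foldl_cons, hstep]
      by_cases hc : index + 1 < xs.length
      · rw [if_pos hc]
        set r := pvAInner xs (index + 1) (xs.getD index "") with hr
        have hfold := pvAInner_fold xs (index + 1) (xs.getD index "") acc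
        rw [← hr] at hfold
        rw [hfold]
        by_cases hr1 : r.1 < xs.length
        · have hstop : PySem.Str.isIn "):" (xs.getD r.1 "") = true := by
            have := pvAInner_stop xs (index + 1) (xs.getD index "") (by rw [← hr]; exact hr1)
            rwa [← hr] at this
          have hge : index + 1 ≤ r.1 := by rw [hr]; exact pvAInner_ge xs (index + 1) _
          exact ih r.1 _ (by omega) hr1 hstop
        · rw [pvALoop, dif_neg hr1, List.drop_eq_nil_of_le (by omega), List.foldl_nil]
      · rw [if_neg hc, pvALoop, dif_neg (by omega),
          List.drop_eq_nil_of_le (by omega), List.foldl_nil]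
  exact main (xs.length - index) index acc (le_refl _) hlt hp

-- ===== VERDICT (by name: the statement is the Claim_ definition above) =====
theorem parseArgLines_py_spec : Claim_equal_parseArgLines_py := by
  intro section_ _
  unfold Spec_parseArgLines_py parseArgLines_py parseArgLines_py_alt
  set xs := (PySem.Str.split? section_ "\n").getD [] with hxs
  by_cases hlen : xs.length < 2
  · rw [if_pos hlen, if_pos (Or.inl hlen)]
  · rw [if_neg hlen]
    have h1 : 1 < xs.length := by omega
    by_cases hp : PySem.Str.isIn "):" (xs.getD 1 "") = true
    · rw [pvALoop_eq_fold xs 1 [] h1 hp, if_neg (by rw [not_or]; exact ⟨hlen, by simpa using hp⟩)]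
    · have hp' : PySem.Str.isIn "):" (xs.getD 1 "") = false := by
        simpa using hp
      rw [pvALoop, dif_pos h1, if_pos hp', if_pos (Or.inr hp')]
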